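-- pv_equiv track=rewrite | github.com/IceJinx33/auto-err-template-fill | MUC_Error_Analysis_Operation.py | extract_span_diff
-- ===== SOURCE A (Python) =====
-- def extract_span_diff(string1, diff, start):
--     """
--     This functions returns a string containing [diff] number of consecutive
--     alphanumeric characters from [string1] as well as any non-alphanumeric
--     characters it encounters while searching for alphanumeric characters. If
--     [start] = True, extraction starts from the beginning of the string, otherwise,
--     extraction begins at the end of the string.
--     :params string1: the input string
--     :type string1: string
--     :params diff: the number of alphanumeric characters to extract
--     :type diff: [diff] is an int > 0
--     :params start: whether extraction starts at the beginning ([start] = True)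
--     or end of [string1] ([start] = False)
--     :type beg: [start] is an bool
--     """
--     if start == False:
--         string1 = string1[::-1]
--     d = 0
--     s = ""
--     for c in string1:
--         s += c
--         if c.isalnum():
--             d += 1
--         else:
--             continue
--         if d == diff:
--             break
--     if start == False:
--         return s[::-1]
--     else:
--         return s
-- ===== SOURCE B (Python) =====
-- def extract_span_diff(string1, diff, start):
--     positions = [i for i, c in enumerate(string1) if c.isalnum()]
--     if diff < 1 or diff > len(positions):
--         return string1
--     if start:
--         return string1[:positions[diff - 1] + 1]
--     else:
--         return string1[positions[-diff]:]
-- ===== Notes on version B (the rewrite author's own statement) =====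
-- stated objective: simpler
-- what changed: A accumulates characters one by one while counting alnum chars (reversing the whole string twice for the end case); B collects the alnum character indices in one comprehension and returns a single slice of the original string, with no accumulation and no reversal.
import Mathlib
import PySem

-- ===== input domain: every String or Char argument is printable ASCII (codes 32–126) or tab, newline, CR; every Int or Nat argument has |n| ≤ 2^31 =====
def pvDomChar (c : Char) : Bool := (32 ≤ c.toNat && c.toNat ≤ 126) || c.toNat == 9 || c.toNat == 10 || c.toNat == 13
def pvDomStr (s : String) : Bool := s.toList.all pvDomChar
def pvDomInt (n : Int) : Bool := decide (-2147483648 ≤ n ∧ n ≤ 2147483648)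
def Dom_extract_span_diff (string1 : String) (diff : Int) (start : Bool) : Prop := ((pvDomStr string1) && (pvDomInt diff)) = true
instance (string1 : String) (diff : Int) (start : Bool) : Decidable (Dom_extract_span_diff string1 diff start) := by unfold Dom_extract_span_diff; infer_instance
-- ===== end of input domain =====

-- B replaces A's char-by-char accumulating scan (with double string reversal for the end case)
-- by one pass collecting the alnum indices and a single slice; objective: simpler.


-- ===== PORT A =====
-- A's for-loop: s += c; count alnum chars; break when the count reaches diff
def pvALoop : List Char → Int → Int → List Char → List Char
  | [], _, _, s => s
  | c :: rest, d, diff, s =>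
    if PySem.Chars.isalnum c then
      if d + 1 = diff then s ++ [c]
      else pvALoop rest (d + 1) diff (s ++ [c])
    else pvALoop rest d diff (s ++ [c])

def extract_span_diff (string1 : String) (diff : Int) (start : Bool) : String :=
  -- string1[::-1] is reverse (PySem.Str.slice?_none_none_neg_one); applied on the way in and
  -- again on the result when start == False, exactly as in A
  if start = false then
    String.ofList (pvALoop string1.toList.reverse 0 diff []).reverse
  else
    String.ofList (pvALoop string1.toList 0 diff [])

-- ===== PORT B =====
-- positions = [i for i, c in enumerate(string1) if c.isalnum()]
def pvPositions (cs : List Char) : List Int :=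
  ((PySem.List.enumerate cs 0).filter (fun p => PySem.Chars.isalnum p.2)).map (·.1)

def extract_span_diff_alt (string1 : String) (diff : Int) (start : Bool) : String :=
  if diff < 1 ∨ ((pvPositions string1.toList).length : Int) < diff then string1
  else if start then
    -- string1[:positions[diff - 1] + 1]
    String.ofList (PySem.List.slice string1.toList none
      (some (PySem.List.pyGetD (pvPositions string1.toList) (diff - 1) 0 + 1)))
  else
    -- string1[positions[-diff]:]
    String.ofList (PySem.List.slice string1.toList
      (some (PySem.List.pyGetD (pvPositions string1.toList) (-diff) 0)) none)

-- ===== PRECONDITION & SPEC =====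
def Spec_extract_span_diff (string1 : String) (diff : Int) (start : Bool) (out : String) : Prop := out = extract_span_diff_alt string1 diff start
instance (string1 : String) (diff : Int) (start : Bool) (out : String) : Decidable (Spec_extract_span_diff string1 diff start out) := by unfold Spec_extract_span_diff; infer_instance

-- ===== CLAIM (what is proved, stated in full; the proofs are below) =====
def Claim_equal_extract_span_diff : Prop := ∀ (string1 : String) (diff : Int) (start : Bool), Dom_extract_span_diff string1 diff start → Spec_extract_span_diff string1 diff start (extract_span_diff string1 diff start)

-- ===== LEMMAS AND PROOFS =====

-- indices of the alnum characters of cs (Nat-valued mirror of pvPositions)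
def pvNpos : List Char → List Nat
  | [] => []
  | c :: rest =>
    if PySem.Chars.isalnum c then 0 :: (pvNpos rest).map (· + 1)
    else (pvNpos rest).map (· + 1)

-- prefix of cs up to and including its k-th alnum character (all of cs if fewer than k, or k < 1)
def pvTakeK (k : Int) : List Char → List Char
  | [] => []
  | c :: rest =>
    c :: (if PySem.Chars.isalnum c then (if k = 1 then [] else pvTakeK (k - 1) rest)
          else pvTakeK k rest)

theorem pvNpos_cons_pos (c : Char) (rest : List Char) (hc : PySem.Chars.isalnum c = true) :
    pvNpos (c :: rest) = 0 :: (pvNpos rest).map (· + 1) := by simp [pvNpos, hc]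

theorem pvNpos_cons_neg (c : Char) (rest : List Char) (hc : ¬ PySem.Chars.isalnum c = true) :
    pvNpos (c :: rest) = (pvNpos rest).map (· + 1) := by simp [pvNpos, hc]

theorem pvPositions_eq : ∀ (cs : List Char) (s : Int),
    ((PySem.List.enumerate cs s).filter (fun p => PySem.Chars.isalnum p.2)).map (·.1)
      = (pvNpos cs).map (fun (n : Nat) => s + (n : Int)) := by
  intro cs
  induction cs with
  | nil => intro s; simp [PySem.List.enumerate, pvNpos]
  | cons c rest ih =>
    intro s
    by_cases hc : PySem.Chars.isalnum c
    · rw [PySem.List.enumerate_cons, List.filter_cons_of_pos (by simpa using hc),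
        List.map_cons, ih (s + 1), pvNpos_cons_pos c rest hc, List.map_cons, List.map_map]
      refine List.cons_eq_cons.mpr ⟨by omega, List.map_congr_left (fun n _ => ?_)⟩
      simp only [Function.comp_apply]; push_cast; omega
    · rw [PySem.List.enumerate_cons, List.filter_cons_of_neg (by simpa using hc), ih (s + 1),
        pvNpos_cons_neg c rest hc, List.map_map]
      exact List.map_congr_left (fun n _ => by simp only [Function.comp_apply]; push_cast; omega)

theorem pvNpos_append : ∀ (xs ys : List Char),
    pvNpos (xs ++ ys) = pvNpos xs ++ (pvNpos ys).map (· + xs.length) := by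
  intro xs ys
  induction xs with
  | nil => simp [pvNpos]
  | cons c rest ih =>
    by_cases hc : PySem.Chars.isalnum c
    · rw [List.cons_append, pvNpos_cons_pos c _ hc, pvNpos_cons_pos c rest hc, ih,
        List.map_append, List.map_map, List.length_cons, List.cons_append]
      refine List.cons_eq_cons.mpr ⟨rfl, congrArg (_ ++ ·) (List.map_congr_left (fun n _ => ?_))⟩
      simp only [Function.comp_apply]; omega
    · rw [List.cons_append, pvNpos_cons_neg c _ hc, pvNpos_cons_neg c rest hc, ih,
        List.map_append, List.map_map, List.length_cons]
      exact congrArg (_ ++ ·)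
        (List.map_congr_left (fun n _ => by simp only [Function.comp_apply]; omega))

theorem pvNpos_reverse : ∀ (cs : List Char),
    pvNpos cs.reverse = ((pvNpos cs).map (fun m => cs.length - 1 - m)).reverse := by
  intro cs
  induction cs with
  | nil => simp [pvNpos]
  | cons c rest ih =>
    rw [List.reverse_cons, pvNpos_append rest.reverse [c], ih]
    by_cases hc : PySem.Chars.isalnum c
    · have hone : pvNpos [c] = [0] := by simp [pvNpos, hc]
      rw [hone, pvNpos_cons_pos c rest hc]
      simp only [List.map_cons, List.map_map, List.reverse_cons, List.map_nil,
        List.length_reverse, List.length_cons]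
      refine congrArg₂ (· ++ ·)
        (congrArg List.reverse (List.map_congr_left (fun m _ => ?_))) ?_
      · simp only [Function.comp_apply]; omega
      · simp
    · have hone : pvNpos [c] = [] := by simp [pvNpos, hc]
      rw [hone, pvNpos_cons_neg c rest hc, List.map_map, List.map_nil, List.append_nil]
      exact congrArg List.reverse (List.map_congr_left (fun m _ => by
        simp only [Function.comp_apply, List.length_cons]; omega))

theorem pvALoop_eq : ∀ (cs : List Char) (d diff : Int) (s : List Char),
    pvALoop cs d diff s = s ++ pvTakeK (diff - d) cs := by
  intro cs
  induction cs with
  | nil => intro d diff s; simp [pvALoop, pvTakeK]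
  | cons c rest ih =>
    intro d diff s
    by_cases hc : PySem.Chars.isalnum c
    · by_cases hd : d + 1 = diff
      · have h1 : diff - d = 1 := by omega
        simp [pvALoop, pvTakeK, hc, hd, h1]
      · have h1 : diff - d ≠ 1 := by omega
        have h2 : diff - (d + 1) = diff - d - 1 := by ring
        simp [pvALoop, pvTakeK, hc, hd, h1, ih, h2]
    · simp [pvALoop, pvTakeK, hc, ih]

theorem pvNpos_lt : ∀ (cs : List Char), ∀ m ∈ pvNpos cs, m < cs.length := by
  intro cs
  induction cs with
  | nil => simp [pvNpos]
  | cons c rest ih =>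
    intro m hm
    by_cases hc : PySem.Chars.isalnum c
    · rw [pvNpos_cons_pos c rest hc] at hm
      simp only [List.mem_cons, List.mem_map] at hm
      rcases hm with h | ⟨a, ha, rfl⟩
      · simp [h]
      · have := ih a ha; simp; omega
    · rw [pvNpos_cons_neg c rest hc] at hm
      simp only [List.mem_map] at hm
      rcases hm with ⟨a, ha, rfl⟩
      have := ih a ha; simp; omega

theorem pvTakeK_all : ∀ (cs : List Char) (k : Int),
    (k < 1 ∨ ((pvNpos cs).length : Int) < k) → pvTakeK k cs = cs := by
  intro cs
  induction cs with
  | nil => intro k _; simp [pvTakeK]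
  | cons c rest ih =>
    intro k hk
    by_cases hc : PySem.Chars.isalnum c
    · rw [pvNpos_cons_pos c rest hc] at hk
      simp only [List.length_cons, List.length_map] at hk
      have hne : k ≠ 1 := by omega
      have : pvTakeK (k - 1) rest = rest := ih (k - 1) (by omega)
      simp [pvTakeK, hc, hne, this]
    · rw [pvNpos_cons_neg c rest hc] at hk
      simp only [List.length_map] at hk
      simp [pvTakeK, hc, ih k hk]

theorem pvTakeK_take : ∀ (cs : List Char) (j : Nat) (h : j < (pvNpos cs).length),
    pvTakeK ((j : Int) + 1) cs = cs.take ((pvNpos cs)[j] + 1) := by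
  intro cs
  induction cs with
  | nil => intro j h; simp [pvNpos] at h
  | cons c rest ih =>
    intro j h
    by_cases hc : PySem.Chars.isalnum c
    · cases j with
      | zero => simp [pvTakeK, pvNpos, hc]
      | succ j' =>
        have h' : j' < (pvNpos rest).length := by
          rw [pvNpos_cons_pos c rest hc] at h
          simpa using h
        have hne : ¬ (((j' + 1 : Nat) : Int) + 1 = 1) := by push_cast; omega
        have harith : ((j' + 1 : Nat) : Int) + 1 - 1 = ((j' : Nat) : Int) + 1 := by push_cast; ring
        have hg : (pvNpos (c :: rest))[j' + 1]'h = (pvNpos rest)[j']'h' + 1 := by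
          simp [pvNpos_cons_pos c rest hc]
        rw [hg]
        simp only [pvTakeK, hc, if_pos, if_neg hne, harith, ih j' h', List.take_succ_cons]
    · have h' : j < (pvNpos rest).length := by
        rw [pvNpos_cons_neg c rest hc] at h
        simpa using h
      have hg : (pvNpos (c :: rest))[j]'h = (pvNpos rest)[j]'h' + 1 := by
        simp [pvNpos_cons_neg c rest hc]
      rw [hg]
      simp [pvTakeK, hc, ih j h']

theorem pvPositions_npos (cs : List Char) :
    pvPositions cs = (pvNpos cs).map (fun (n : Nat) => (n : Int)) := by
  unfold pvPositions
  rw [pvPositions_eq]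
  exact List.map_congr_left (fun n _ => by omega)

theorem pv_main : ∀ (string1 : String) (diff : Int) (start : Bool),
    extract_span_diff string1 diff start = extract_span_diff_alt string1 diff start := by
  intro string1 diff start
  unfold extract_span_diff extract_span_diff_alt
  have posEq := pvPositions_npos string1.toList
  have poslen : (pvPositions string1.toList).length = (pvNpos string1.toList).length := by
    rw [posEq]; simp
  have hrevlen : (pvNpos string1.toList.reverse).length = (pvNpos string1.toList).length := by
    rw [pvNpos_reverse]; simp
  by_cases hg : diff < 1 ∨ ((pvPositions string1.toList).length : Int) < diff
  · rw [if_pos hg]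
    have hg' : diff < 1 ∨ ((pvNpos string1.toList).length : Int) < diff := by
      rw [poslen] at hg; exact hg
    cases start
    · rw [if_pos rfl, pvALoop_eq, List.nil_append, sub_zero,
        pvTakeK_all _ _ (by rw [hrevlen]; exact hg'), List.reverse_reverse]
      simp
    · rw [if_neg (by simp), pvALoop_eq, List.nil_append, sub_zero, pvTakeK_all _ _ hg']
      simp
  · rw [if_neg hg]
    push Not at hg
    obtain ⟨h1, h2⟩ := hg
    rw [poslen] at h2
    obtain ⟨j, hdiff, hjL⟩ :
        ∃ j : Nat, diff = (j : Int) + 1 ∧ j < (pvNpos string1.toList).length :=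
      ⟨diff.toNat - 1, by omega, by omega⟩
    cases start
    · -- start = False
      have hjQ : j < (pvNpos string1.toList.reverse).length := by rw [hrevlen]; exact hjL
      rw [if_pos rfl, hdiff, pvALoop_eq, List.nil_append, sub_zero,
        pvTakeK_take _ j hjQ, List.take_reverse, List.reverse_reverse]
      have hQ : (pvNpos string1.toList.reverse)[j]'hjQ
          = string1.toList.length - 1 -
            (pvNpos string1.toList)[(pvNpos string1.toList).length - 1 - j]'(by omega) := by
        rw [List.getElem_of_eq (pvNpos_reverse string1.toList) hjQ]
        rw [List.getElem_reverse, List.getElem_map]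
        simp
      have hpb : (pvNpos string1.toList)[(pvNpos string1.toList).length - 1 - j]'(by omega)
          < string1.toList.length :=
        pvNpos_lt _ _ (List.getElem_mem _)
      have eA : string1.toList.length - ((pvNpos string1.toList.reverse)[j]'hjQ + 1)
          = (pvNpos string1.toList)[(pvNpos string1.toList).length - 1 - j]'(by omega) := by
        rw [hQ]; omega
      rw [eA]
      have eneg : -((j : Int) + 1) = -(((j + 1 : Nat) : Int)) := by push_cast; ring
      rw [eneg, posEq, PySem.List.pyGetD_neg_natCast _ (j + 1) 0 (by omega) (by simp; omega),
        List.getElem_map, PySem.List.slice_from _ (by omega)]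
      have eidx : (List.map (fun (n : Nat) => (n : Int)) (pvNpos string1.toList)).length - (j + 1)
          = (pvNpos string1.toList).length - 1 - j := by simp; omega
      simp only [eidx, Int.toNat_natCast]
      rw [if_neg (by simp)]
    · -- start = True
      rw [if_neg (by simp), if_pos rfl, hdiff, pvALoop_eq, List.nil_append, sub_zero,
        pvTakeK_take _ j hjL]
      have e1 : (j : Int) + 1 - 1 = ((j : Nat) : Int) := by ring
      rw [e1, posEq, PySem.List.pyGetD_natCast,
        List.getD_eq_getElem _ _ (by simpa using hjL), List.getElem_map,
        PySem.List.slice_to _ (by omega)]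
      have e2 : (((pvNpos string1.toList)[j] : Int) + 1).toNat
          = (pvNpos string1.toList)[j] + 1 := by omega
      rw [e2]

-- ===== VERDICT (by name: the statement is the Claim_ definition above) =====
theorem extract_span_diff_spec : Claim_equal_extract_span_diff := by
  intro string1 diff start _
  unfold Spec_extract_span_diff
  exact pv_main string1 diff start
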